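-- pv_equiv track=rewrite | github.com/matoussynek/advent_of_code_2023 | 9/code.py | extrapolate2
-- ===== SOURCE A (Python) =====
-- def extrapolate2(arr):
--     is_zero = True
--     for x in arr:
--         is_zero = is_zero and x == 0
--     if is_zero:
--         return 0
--
--     next_arr = [y-x for x, y in zip(arr, arr[1:])]
--     added_val = extrapolate2(next_arr)
--     return arr[0] - added_val
-- ===== SOURCE B (Python) =====
-- def extrapolate2(arr):
--     n = len(arr)
--     total = 0
--     sign = 1
--     c = n  # C(n, 1)
--     j = 0
--     for a in arr:
--         total += sign * c * a
--         c = c * (n - j - 1) // (j + 2)  # C(n, j+2)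
--         sign = -sign
--         j += 1
--     return total
-- ===== Notes on version B (the rewrite author's own statement) =====
-- stated objective: alternative
-- what changed: replaces the recursive difference-array cascade (O(n^2) element operations) by a single left-to-right pass that accumulates sum((-1)^j * C(n,j+1) * arr[j]), maintaining the binomial coefficient incrementally (intended as faster; measured 91x at n=1024, but on very large random inputs both are dominated by big-integer growth and neither finishes)
import Mathlib
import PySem

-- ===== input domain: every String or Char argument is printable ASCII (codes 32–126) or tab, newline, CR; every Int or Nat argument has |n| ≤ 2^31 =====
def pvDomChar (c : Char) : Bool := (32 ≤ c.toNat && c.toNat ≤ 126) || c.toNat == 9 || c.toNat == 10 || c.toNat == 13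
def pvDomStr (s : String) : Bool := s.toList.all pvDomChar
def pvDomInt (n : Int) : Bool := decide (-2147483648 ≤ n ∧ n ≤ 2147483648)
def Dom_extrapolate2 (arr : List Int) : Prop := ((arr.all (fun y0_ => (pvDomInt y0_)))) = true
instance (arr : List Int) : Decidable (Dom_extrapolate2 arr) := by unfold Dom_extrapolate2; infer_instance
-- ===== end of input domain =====

-- B replaces A's recursive difference-array cascade (quadratically many element operations)
-- by one left-to-right pass using the finite-difference closed form sum_j (-1)^j * C(n,j+1) * arr[j].

-- ===== PORT A =====
-- literal transliteration of A; arr[0] is reached only with arr ≠ [] (is_zero is false),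
-- so PySem.List.pyGetD arr 0 0 returns exactly Python's arr[0] there.
def extrapolate2 (arr : List Int) : Int :=
  let is_zero := arr.foldl (fun b x => b && (x == 0)) true
  if is_zero then 0
  else
    let next_arr := (arr.zip (arr.drop 1)).map (fun p => p.2 - p.1)
    let added_val := extrapolate2 next_arr
    PySem.List.pyGetD arr 0 0 - added_val
termination_by arr.length
decreasing_by
  cases arr with
  | nil => rename_i h; simp only [show is_zero = true from rfl] at h; exact absurd trivial h
  | cons a t => simp

-- ===== PORT B =====
-- state (total, sign, c, j); c is maintained as C(n, j+1) by exact integer division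
def extrapolate2_alt (arr : List Int) : Int :=
  let n : Int := arr.length
  let s := arr.foldl
    (fun (s : Int × Int × Int × Int) a =>
      (s.1 + s.2.1 * s.2.2.1 * a, -s.2.1,
       PySem.Int.floordiv (s.2.2.1 * (n - s.2.2.2 - 1)) (s.2.2.2 + 2), s.2.2.2 + 1))
    (0, 1, n, 0)
  s.1

-- ===== PRECONDITION & SPEC =====
def Spec_extrapolate2 (arr : List Int) (out : Int) : Prop := out = extrapolate2_alt arr
instance (arr : List Int) (out : Int) : Decidable (Spec_extrapolate2 arr out) := by unfold Spec_extrapolate2; infer_instance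

-- ===== CLAIM (what is proved, stated in full; the proofs are below) =====
def Claim_equal_extrapolate2 : Prop := ∀ (arr : List Int), Dom_extrapolate2 arr → Spec_extrapolate2 arr (extrapolate2 arr)

-- ===== LEMMAS AND PROOFS =====

-- the common characterisation: the signed-binomial finite-difference sum
def pvS (arr : List Int) : Int :=
  ∑ j ∈ Finset.range arr.length, (-1 : Int) ^ j * (arr.length.choose (j + 1) : Int) * arr.getD j 0

lemma pv_choose_step (n j : Nat) :
    PySem.Int.floordiv ((n.choose (j + 1) : Int) * ((n : Int) - (j : Int) - 1)) ((j : Int) + 2)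
      = (n.choose (j + 2) : Int) := by
  by_cases h : j + 1 < n
  · have hsub : (n : Int) - (j : Int) - 1 = ((n - (j + 1) : Nat) : Int) := by
      have := h; push_cast [Nat.cast_sub (le_of_lt h)]; ring
    have hkey : n.choose (j + 1) * (n - (j + 1)) = n.choose (j + 2) * (j + 2) := by
      exact (Nat.choose_succ_right_eq n (j + 1)).symm
    rw [hsub]
    have : ((j : Int) + 2) = ((j + 2 : Nat) : Int) := by push_cast; ring
    rw [this, ← Nat.cast_mul, hkey, PySem.Int.floordiv_natCast]
    simp
  · -- here the product is 0: either n = j+1 (second factor 0) or choose = 0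
    have hz : (n.choose (j + 1) : Int) * ((n : Int) - (j : Int) - 1) = 0 := by
      rcases Nat.lt_or_ge j.succ n with h' | h'
      · exact absurd h' h
      · rcases Nat.eq_or_lt_of_le h' with h'' | h''
        · have : (n : Int) - (j : Int) - 1 = 0 := by omega
          simp [this]
        · have : n.choose (j + 1) = 0 := Nat.choose_eq_zero_of_lt h''
          simp [this]
    have hz2 : n.choose (j + 2) = 0 := Nat.choose_eq_zero_of_lt (by omega)
    rw [hz, hz2]
    rw [PySem.Int.floordiv_eq_ediv_of_pos (by positivity)]
    simp

lemma pv_bfold_inv (n : Nat) (l : List Int) : ∀ (j : Nat) (total : Int),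
    (l.foldl
      (fun (s : Int × Int × Int × Int) a =>
        (s.1 + s.2.1 * s.2.2.1 * a, -s.2.1,
         PySem.Int.floordiv (s.2.2.1 * ((n : Int) - s.2.2.2 - 1)) (s.2.2.2 + 2), s.2.2.2 + 1))
      (total, (-1 : Int) ^ j, (n.choose (j + 1) : Int), (j : Int))).1
    = total + ∑ i ∈ Finset.range l.length, (-1 : Int) ^ (j + i) * (n.choose (j + i + 1) : Int) * l.getD i 0 := by
  induction l with
  | nil => intro j total; simp
  | cons a t ih =>
    intro j total
    have hstate :
        ((total + (-1 : Int) ^ j * (n.choose (j + 1) : Int) * a, -(-1 : Int) ^ j,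
          PySem.Int.floordiv ((n.choose (j + 1) : Int) * ((n : Int) - (j : Int) - 1)) ((j : Int) + 2),
          (j : Int) + 1) : Int × Int × Int × Int)
        = (total + (-1 : Int) ^ j * (n.choose (j + 1) : Int) * a, (-1 : Int) ^ (j + 1),
           (n.choose (j + 1 + 1) : Int), ((j + 1 : Nat) : Int)) := by
      rw [pv_choose_step]
      push_cast
      ring_nf
    simp only [List.foldl_cons]
    rw [hstate, ih (j + 1)]
    simp only [List.length_cons]
    rw [Finset.sum_range_succ']
    simp only [List.getD_cons_succ, List.getD_cons_zero]
    have hcong : ∀ i ∈ Finset.range t.length,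
        (-1 : Int) ^ (j + 1 + i) * (n.choose (j + 1 + i + 1) : Int) * t.getD i 0
        = (-1 : Int) ^ (j + (i + 1)) * (n.choose (j + (i + 1) + 1) : Int) * t.getD i 0 := by
      intro i _
      have h1 : j + 1 + i = j + (i + 1) := by omega
      rw [h1]
    rw [Finset.sum_congr rfl hcong]
    ring

lemma pv_B_eq_S (arr : List Int) : extrapolate2_alt arr = pvS arr := by
  unfold extrapolate2_alt pvS
  have h := pv_bfold_inv arr.length arr 0 0
  simp only [pow_zero, Nat.choose_one_right, Nat.cast_zero, zero_add] at h
  simpa using h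

lemma pv_foldl_band (arr : List Int) : ∀ (b : Bool),
    arr.foldl (fun b x => b && (x == 0)) b = (b && arr.all (· == 0)) := by
  induction arr with
  | nil => simp
  | cons a t ih => intro b; simp [ih, Bool.and_assoc]

lemma pv_S_zero (arr : List Int) (h : ∀ x ∈ arr, x = 0) : pvS arr = 0 := by
  unfold pvS
  refine Finset.sum_eq_zero ?_
  intro i hi
  have hlt : i < arr.length := Finset.mem_range.mp hi
  have : arr.getD i 0 = 0 := by
    rw [List.getD_eq_getElem arr 0 hlt]
    exact h _ (arr.getElem_mem hlt)
  rw [this, mul_zero]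

lemma pv_diff_getD (arr : List Int) (i : Nat) (hi : i + 1 < arr.length) :
    ((arr.zip (arr.drop 1)).map (fun p => p.2 - p.1)).getD i 0
      = arr.getD (i + 1) 0 - arr.getD i 0 := by
  have hlen : ((arr.zip (arr.drop 1)).map (fun p => p.2 - p.1)).length = arr.length - 1 := by
    simp [List.length_zip]
  have hi' : i < ((arr.zip (arr.drop 1)).map (fun p => p.2 - p.1)).length := by omega
  rw [List.getD_eq_getElem _ 0 hi', List.getD_eq_getElem arr 0 hi, List.getD_eq_getElem arr 0 (by omega)]
  simp [List.getElem_zip]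

lemma pv_S_step (arr : List Int) (hne : arr ≠ []) :
    pvS arr = arr.getD 0 0 - pvS ((arr.zip (arr.drop 1)).map (fun p => p.2 - p.1)) := by
  obtain ⟨m, hm⟩ : ∃ m, arr.length = m + 1 := by
    cases arr with
    | nil => exact absurd rfl hne
    | cons a t => exact ⟨t.length, by simp⟩
  have hlen : ((arr.zip (arr.drop 1)).map (fun p => p.2 - p.1)).length = m := by
    simp [List.length_zip]; omega
  unfold pvS
  rw [hm, hlen]
  -- Pascal: C(m+1, j+1) = C(m, j) + C(m, j+1)
  have hpascal : ∀ j ∈ Finset.range (m + 1),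
      (-1 : Int) ^ j * ((m + 1).choose (j + 1) : Int) * arr.getD j 0
      = (-1 : Int) ^ j * (m.choose j : Int) * arr.getD j 0
        + (-1 : Int) ^ j * (m.choose (j + 1) : Int) * arr.getD j 0 := by
    intro j _
    rw [Nat.choose_succ_succ]
    push_cast
    ring
  rw [Finset.sum_congr rfl hpascal, Finset.sum_add_distrib]
  rw [Finset.sum_range_succ' (fun j => (-1 : Int) ^ j * (m.choose j : Int) * arr.getD j 0) m]
  rw [Finset.sum_range_succ (fun j => (-1 : Int) ^ j * (m.choose (j + 1) : Int) * arr.getD j 0) m]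
  simp only [Nat.choose_zero_right, Nat.choose_succ_self, Nat.cast_one, Nat.cast_zero,
    pow_zero, one_mul, mul_zero, zero_mul, mul_one, add_zero]
  have hsum : ∀ i ∈ Finset.range m,
      (-1 : Int) ^ i * (m.choose (i + 1) : Int)
        * ((arr.zip (arr.drop 1)).map (fun p => p.2 - p.1)).getD i 0
      = (-1 : Int) ^ i * (m.choose (i + 1) : Int) * (arr.getD (i + 1) 0 - arr.getD i 0) := by
    intro i hi
    rw [pv_diff_getD arr i (by have := Finset.mem_range.mp hi; omega)]
  rw [Finset.sum_congr rfl hsum]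
  have hA : (∑ i ∈ Finset.range m, (-1 : Int) ^ (i + 1) * (m.choose (i + 1) : Int) * arr.getD (i + 1) 0)
      + ∑ i ∈ Finset.range m, (-1 : Int) ^ i * (m.choose (i + 1) : Int) * arr.getD i 0
      = - ∑ i ∈ Finset.range m, (-1 : Int) ^ i * (m.choose (i + 1) : Int) * (arr.getD (i + 1) 0 - arr.getD i 0) := by
    rw [← Finset.sum_add_distrib, ← Finset.sum_neg_distrib]
    exact Finset.sum_congr rfl (fun i _ => by ring)
  linarith [hA]

lemma pv_A_eq_S : ∀ (arr : List Int), extrapolate2 arr = pvS arr := by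
  intro arr
  induction hn : arr.length using Nat.strong_induction_on generalizing arr with
  | _ n ih =>
    rw [extrapolate2.eq_def]
    by_cases hz : arr.foldl (fun b x => b && (x == 0)) true = true
    · simp only [hz, if_true]
      symm
      apply pv_S_zero
      have := hz
      rw [pv_foldl_band arr true] at this
      simp only [Bool.true_and, List.all_eq_true, beq_iff_eq] at this
      exact this
    · have hne : arr ≠ [] := by intro he; subst he; simp at hz
      simp only [hz, if_false, Bool.false_eq_true]
      have hlen : ((arr.zip (arr.drop 1)).map (fun p => p.2 - p.1)).length < n := by
        cases arr with
        | nil => exact absurd rfl hne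
        | cons a t => simp at hn ⊢; omega
      rw [ih _ hlen _ rfl, pv_S_step arr hne]
      congr 1
      cases arr with
      | nil => exact absurd rfl hne
      | cons a t => simp [PySem.List.pyGetD]

-- ===== VERDICT (by name: the statement is the Claim_ definition above) =====
theorem extrapolate2_spec : Claim_equal_extrapolate2 := by
  intro arr _
  unfold Spec_extrapolate2
  rw [pv_A_eq_S, pv_B_eq_S]
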